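-- pv_equiv track=rewrite | github.com/vmred/Codewars | kyu6/Two Joggers/solution.py | nbr_of_laps
-- ===== SOURCE A (Python) =====
-- def nbr_of_laps(x, y):
--     x_laps, y_laps = 1, 1
--     x_lap = x
--     y_lap = y
--     while x != y:
--         if x < y:
--             x += x_lap
--             x_laps += 1
--         else:
--             y += y_lap
--             y_laps += 1
--
--     return x_laps, y_laps
-- ===== SOURCE B (Python) =====
-- def nbr_of_laps(x, y):
--     a, b = x, y
--     while b:
--         a, b = b, a % b
--     lcm = x * y // a
--     return lcm // x, lcm // y
-- ===== Notes on version B (the rewrite author's own statement) =====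
-- stated objective: faster
-- what changed: A simulates both joggers lap by lap until their distances meet; B computes gcd by Euclid's algorithm, lcm = x*y//gcd, and returns (lcm//x, lcm//y) directly.
-- outside the precondition, e.g. on nbr_of_laps(0, 0): A returns (1, 1), B raises ZeroDivisionError
import Mathlib
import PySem

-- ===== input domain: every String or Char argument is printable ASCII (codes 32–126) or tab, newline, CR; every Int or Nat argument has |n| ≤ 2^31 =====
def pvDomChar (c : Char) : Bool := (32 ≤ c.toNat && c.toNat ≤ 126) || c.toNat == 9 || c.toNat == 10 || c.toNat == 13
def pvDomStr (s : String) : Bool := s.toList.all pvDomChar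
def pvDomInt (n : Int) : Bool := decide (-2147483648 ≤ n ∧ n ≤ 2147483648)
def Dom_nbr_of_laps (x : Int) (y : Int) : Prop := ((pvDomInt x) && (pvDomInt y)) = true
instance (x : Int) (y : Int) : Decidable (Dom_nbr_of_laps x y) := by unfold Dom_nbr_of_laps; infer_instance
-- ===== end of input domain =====

-- B replaces A's lap-by-lap simulation with Euclid's gcd and the closed form (lcm//x, lcm//y); faster.

-- ===== PORT A =====
-- A's while-loop; the dite guard only secures termination (it always holds on the
-- states the loop actually reaches when 0 < x and 0 < y, and when xc = yc the loop exits first).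
def pvLoopA (x y xc yc xl yl : Int) : List Int :=
  if xc = yc then [xl, yl]
  else if h : 0 < x ∧ 0 < y ∧ xc ≤ x * y ∧ yc ≤ x * y then
    if hlt : xc < yc then pvLoopA x y (xc + x) yc (xl + 1) yl
    else pvLoopA x y xc (yc + y) xl (yl + 1)
  else []
termination_by ((x * y - xc).toNat + (x * y - yc).toNat)
decreasing_by
  · omega
  · omega

def nbr_of_laps (x : Int) (y : Int) : List Int := pvLoopA x y x y 1 1

-- ===== PORT B =====
-- Source B's Euclid loop: while b: a, b = b, a % b  (Python's %)
def pvEuclid (a b : Int) : Int :=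
  if hb0 : b = 0 then a else pvEuclid b (PySem.Int.mod a b)
termination_by b.natAbs
decreasing_by
  rcases lt_or_gt_of_ne hb0 with h | h
  · have := PySem.Int.mod_neg_bounds a h
    omega
  · have h1 := PySem.Int.mod_nonneg a h
    have h2 := PySem.Int.mod_lt a h
    omega

def nbr_of_laps_alt (x : Int) (y : Int) : List Int :=
  let g := pvEuclid x y
  let lcm := PySem.Int.floordiv (x * y) g
  [PySem.Int.floordiv lcm x, PySem.Int.floordiv lcm y]

-- ===== PRECONDITION & SPEC =====
-- Pre_ admits exactly the inputs where A terminates except (0,0): A diverges whenever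
-- x ≠ y and either jogger's speed is ≤ 0 (that jogger can never catch up), and on the
-- single input with both speeds zero A returns a value while B's gcd is 0 and its division raises.
def Pre_nbr_of_laps (x : Int) (y : Int) : Prop := (0 < x ∧ 0 < y) ∨ (x = y ∧ x ≠ 0)
instance (x : Int) (y : Int) : Decidable (Pre_nbr_of_laps x y) := by unfold Pre_nbr_of_laps; infer_instance
def pvWitness_nbr_of_laps : Int × Int := (4, 6)

def Spec_nbr_of_laps (x : Int) (y : Int) (out : List Int) : Prop := out = nbr_of_laps_alt x y
instance (x : Int) (y : Int) (out : List Int) : Decidable (Spec_nbr_of_laps x y out) := by unfold Spec_nbr_of_laps; infer_instance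

-- ===== CLAIM (what is proved, stated in full; the proofs are below) =====
def Claim_equal_nbr_of_laps : Prop := ∀ (x : Int) (y : Int), Dom_nbr_of_laps x y → Pre_nbr_of_laps x y → Spec_nbr_of_laps x y (nbr_of_laps x y)

-- ===== LEMMAS AND PROOFS =====

theorem pvGcd_emod (a b : Int) : Int.gcd b (a % b) = Int.gcd a b := by
  rw [Int.emod_def]
  simp [Int.gcd_comm b a]

theorem pvEuclid_gcd : ∀ (n : Nat) (a b : Int), b.natAbs = n → 0 ≤ a → 0 ≤ b →
    pvEuclid a b = (Int.gcd a b : Int) := by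
  intro n
  induction n using Nat.strong_induction_on with
  | _ n ih =>
    intro a b hn ha hb
    rw [pvEuclid]
    split
    · rename_i h0
      subst h0
      simp [Int.gcd, Int.natAbs_of_nonneg ha]
    · rename_i h0
      have hbpos : 0 < b := lt_of_le_of_ne hb (Ne.symm h0)
      rw [PySem.Int.mod_eq_emod_of_pos hbpos]
      have hlt : (a % b).natAbs < n := by
        have h1 : 0 ≤ a % b := Int.emod_nonneg a h0
        have h2 : a % b < b := Int.emod_lt_of_pos a hbpos
        omega
      rw [ih _ hlt b (a % b) rfl hb (Int.emod_nonneg a h0)]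
      rw [pvGcd_emod]

theorem pvLoopA_eq (x y : Int) (hx : 0 < x) (hy : 0 < y) :
    ∀ (n : Nat) (xc yc xl yl : Int),
      (((Int.lcm x y : Int) - xc).toNat + ((Int.lcm x y : Int) - yc).toNat) = n →
      xc = x * xl → yc = y * yl → 0 < xl → 0 < yl →
      xc ≤ (Int.lcm x y : Int) → yc ≤ (Int.lcm x y : Int) →
      pvLoopA x y xc yc xl yl = [(Int.lcm x y : Int) / x, (Int.lcm x y : Int) / y] := by
  have hxL : x ∣ (Int.lcm x y : Int) := Int.dvd_lcm_left x y
  have hyL : y ∣ (Int.lcm x y : Int) := Int.dvd_lcm_right x y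
  have hxyL : (Int.lcm x y : Int) ≤ x * y := by
    refine Int.le_of_dvd (by positivity) ?_
    rw [Int.coe_lcm]
    exact lcm_dvd (dvd_mul_right x y) (dvd_mul_left y x)
  intro n
  induction n using Nat.strong_induction_on with
  | _ n ih =>
    intro xc yc xl yl hn hxc hyc hxl hyl hxcL hycL
    rw [pvLoopA]
    by_cases heq : xc = yc
    · simp only [heq, if_true]
      -- xc is a positive common multiple ≤ lcm, hence equals lcm
      have hdx : x ∣ yc := heq ▸ ⟨xl, hxc⟩
      have hdy : y ∣ yc := ⟨yl, hyc⟩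
      have hLd : (Int.lcm x y : Int) ∣ yc := by
        rw [Int.coe_lcm]; exact lcm_dvd hdx hdy
      have hpos : 0 < yc := by rw [hyc]; positivity
      have hLyc : (Int.lcm x y : Int) = yc := le_antisymm (Int.le_of_dvd hpos hLd) (heq ▸ hxcL)
      have e1 : (Int.lcm x y : Int) / x = xl := by
        rw [hLyc, ← heq, hxc, Int.mul_ediv_cancel_left xl (ne_of_gt hx)]
      have e2 : (Int.lcm x y : Int) / y = yl := by
        rw [hLyc, hyc, Int.mul_ediv_cancel_left yl (ne_of_gt hy)]
      rw [e1, e2]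
    · have hguard : 0 < x ∧ 0 < y ∧ xc ≤ x * y ∧ yc ≤ x * y :=
        ⟨hx, hy, le_trans hxcL hxyL, le_trans hycL hxyL⟩
      rw [if_neg heq, dif_pos hguard]
      by_cases hlt : xc < yc
      · rw [dif_pos hlt]
        have hstep : xc + x ≤ (Int.lcm x y : Int) := by
          have hdvd : x ∣ (Int.lcm x y : Int) - xc := by
            exact dvd_sub hxL ⟨xl, hxc⟩
          have hpos : 0 < (Int.lcm x y : Int) - xc := by omega
          have := Int.le_of_dvd hpos hdvd
          omega
        refine ih _ (by omega) (xc + x) yc (xl + 1) yl rfl (by rw [hxc]; ring) hyc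
          (by omega) hyl hstep hycL
      · rw [dif_neg hlt]
        have hlt' : yc < xc := by omega
        have hstep : yc + y ≤ (Int.lcm x y : Int) := by
          have hdvd : y ∣ (Int.lcm x y : Int) - yc := by
            exact dvd_sub hyL ⟨yl, hyc⟩
          have hpos : 0 < (Int.lcm x y : Int) - yc := by omega
          have := Int.le_of_dvd hpos hdvd
          omega
        refine ih _ (by omega) xc (yc + y) xl (yl + 1) rfl hxc (by rw [hyc]; ring)
          hxl (by omega) hxcL hstep

-- ===== VERDICT (by name: the statement is the Claim_ definition above) =====
theorem nbr_of_laps_spec : Claim_equal_nbr_of_laps := by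
  intro x y _ hpre
  unfold Spec_nbr_of_laps nbr_of_laps nbr_of_laps_alt
  rcases hpre with ⟨hx, hy⟩ | ⟨heq, hne⟩
  · -- both speeds positive: A's simulation meets at the lcm
    have hg : pvEuclid x y = (Int.gcd x y : Int) :=
      pvEuclid_gcd _ x y rfl (le_of_lt hx) (le_of_lt hy)
    have hgpos : (0 : Int) < (Int.gcd x y : Int) := by
      exact_mod_cast Int.gcd_pos_of_ne_zero_left y (ne_of_gt hx)
    have hmul : (Int.gcd x y : Int) * (Int.lcm x y : Int) = x * y := by
      have h := Int.gcd_mul_lcm x y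
      have hxy : (0:Int) ≤ x * y := by positivity
      rw [← Int.natAbs_of_nonneg hxy, Int.natAbs_mul]
      exact_mod_cast h
    have hlcm : PySem.Int.floordiv (x * y) (pvEuclid x y) = (Int.lcm x y : Int) := by
      rw [hg, PySem.Int.floordiv_eq_ediv_of_pos hgpos, ← hmul,
        Int.mul_ediv_cancel_left _ (ne_of_gt hgpos)]
    simp only [hlcm]
    rw [PySem.Int.floordiv_eq_ediv_of_pos hx, PySem.Int.floordiv_eq_ediv_of_pos hy]
    have hxL : x ≤ (Int.lcm x y : Int) :=
      Int.le_of_dvd (by exact_mod_cast Int.lcm_pos (ne_of_gt hx) (ne_of_gt hy)) (Int.dvd_lcm_left x y)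
    have hyL : y ≤ (Int.lcm x y : Int) :=
      Int.le_of_dvd (by exact_mod_cast Int.lcm_pos (ne_of_gt hx) (ne_of_gt hy)) (Int.dvd_lcm_right x y)
    exact pvLoopA_eq x y hx hy _ x y 1 1 rfl (by ring) (by ring) one_pos one_pos hxL hyL
  · -- equal nonzero speeds: both return [1, 1]
    subst heq
    rw [pvLoopA]
    simp only [if_true]
    have hmod : PySem.Int.mod x x = 0 := (PySem.Int.mod_eq_zero_iff_dvd x x).mpr dvd_rfl
    rw [pvEuclid, dif_neg hne, hmod, pvEuclid, dif_pos rfl]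
    simp only [PySem.Int.floordiv]
    rw [Int.mul_fdiv_cancel_left x hne, Int.fdiv_self hne]
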